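-- pv_equiv track=rewrite | github.com/ruanchaves/rerelem | preprocess.py | add_tags
-- ===== SOURCE A (Python) =====
-- def add_tags(text, indexes, tags):
--     indexes_list = []
--     tags_list = []
--     for idx, (start_span, end_span) in enumerate(indexes):
--         indexes_list.append(start_span)
--         tags_list.append(f"[{tags[idx]}]")
--         indexes_list.append(end_span)
--         tags_list.append(f"[/{tags[idx]}]")
--
--     pairs = sorted(zip(indexes_list, tags_list), key=lambda x: x[0], reverse=True)
--
--     for index, tag in pairs:
--         text = text[:index] + tag + text[index:]
--
--     return text
-- ===== SOURCE B (Python) =====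
-- def add_tags(text, indexes, tags):
--     # Same insertion semantics, but into a piece table: each insertion splits one
--     # piece instead of copying the whole string; the result is joined once.
--     events = []
--     for idx, (start_span, end_span) in enumerate(indexes):
--         events.append((start_span, f"[{tags[idx]}]"))
--         events.append((end_span, f"[/{tags[idx]}]"))
--     events.sort(key=lambda x: x[0], reverse=True)
--
--     pieces = [text]
--     length = len(text)
--     for i, tag in events:
--         pos = i if i >= 0 else length + i
--         pos = 0 if pos < 0 else (length if length < pos else pos)
--         acc = 0
--         for j, piece in enumerate(pieces):
--             if pos <= acc + len(piece):
--                 off = pos - acc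
--                 pieces[j:j + 1] = [piece[:off], tag, piece[off:]]
--                 break
--             acc += len(piece)
--         length += len(tag)
--     return "".join(pieces)
-- ===== Notes on version B (the rewrite author's own statement) =====
-- stated objective: alternative
-- what changed: Instead of rebuilding the whole string by slice-concatenation for every tag insertion, B inserts each tag into a piece table (splitting the one piece that contains the position, found by walking accumulated lengths) and joins the pieces once at the end; this avoids whole-string copies, but measured speedups varied with the input family (1.45x-2.95x at the largest size), so speed is not claimed.
import Mathlib
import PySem

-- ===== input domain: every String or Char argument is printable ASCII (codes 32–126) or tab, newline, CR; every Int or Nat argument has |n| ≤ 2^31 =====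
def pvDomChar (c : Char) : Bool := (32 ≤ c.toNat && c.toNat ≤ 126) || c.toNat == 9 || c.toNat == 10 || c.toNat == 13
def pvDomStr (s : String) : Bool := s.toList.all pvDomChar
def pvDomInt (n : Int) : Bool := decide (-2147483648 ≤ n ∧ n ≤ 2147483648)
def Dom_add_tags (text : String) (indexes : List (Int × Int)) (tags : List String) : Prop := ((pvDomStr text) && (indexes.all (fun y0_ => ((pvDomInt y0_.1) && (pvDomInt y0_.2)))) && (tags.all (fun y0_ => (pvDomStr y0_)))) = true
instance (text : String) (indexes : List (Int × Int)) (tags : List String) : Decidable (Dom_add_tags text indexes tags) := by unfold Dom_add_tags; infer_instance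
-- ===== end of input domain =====

-- B keeps A's insertion semantics but inserts each tag into a piece table (splitting
-- one piece per insertion, joining once at the end) instead of rebuilding the whole
-- string per tag (objective: alternative data structure; avoids whole-string copies).

-- ===== PORT A =====
def add_tags (text : String) (indexes : List (Int × Int)) (tags : List String) : String :=
  let lists := (PySem.List.enumerate indexes 0).foldl
    (fun (acc : List Int × List String) ip =>
      (acc.1 ++ [ip.2.1] ++ [ip.2.2],
       acc.2 ++ ["[" ++ PySem.List.pyGetD tags ip.1 "" ++ "]"]
             ++ ["[/" ++ PySem.List.pyGetD tags ip.1 "" ++ "]"]))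
    ([], [])
  let pairs := PySem.List.sorted (lists.1.zip lists.2) (fun x => x.1) true
  String.ofList (pairs.foldl
    (fun (t : List Char) it =>
      PySem.List.slice t none (some it.1) ++ it.2.toList ++ PySem.List.slice t (some it.1) none)
    text.toList)

-- ===== PORT B =====
-- the inner for-loop of Source B: walk the pieces, split the piece containing pos
def insertAt (tag : String) (pos : Int) : List String → Int → List String
  | [], _ => []
  | piece :: rest, acc =>
      if pos ≤ acc + PySem.Str.len piece then
        String.ofList (PySem.List.slice piece.toList none (some (pos - acc))) :: tag ::
          String.ofList (PySem.List.slice piece.toList (some (pos - acc)) none) :: rest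
      else piece :: insertAt tag pos rest (acc + PySem.Str.len piece)

def add_tags_alt (text : String) (indexes : List (Int × Int)) (tags : List String) : String :=
  let events := (PySem.List.enumerate indexes 0).foldl
    (fun (acc : List (Int × String)) ip =>
      acc ++ [(ip.2.1, "[" ++ PySem.List.pyGetD tags ip.1 "" ++ "]")]
          ++ [(ip.2.2, "[/" ++ PySem.List.pyGetD tags ip.1 "" ++ "]")]) []
  let eventsSorted := PySem.List.sorted events (fun x => x.1) true
  let res := eventsSorted.foldl
    (fun (st : List String × Int) ev =>
      let pos0 : Int := if 0 ≤ ev.1 then ev.1 else st.2 + ev.1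
      let pos : Int := if pos0 < 0 then 0 else if st.2 < pos0 then st.2 else pos0
      (insertAt ev.2 pos st.1 0, st.2 + PySem.Str.len ev.2))
    ([text], PySem.Str.len text)
  PySem.Str.join "" res.1

-- ===== PRECONDITION & SPEC =====
-- Pre_ excludes exactly the inputs on which A raises IndexError: fewer tags than
-- index pairs (tags[idx] out of range).
def Pre_add_tags (text : String) (indexes : List (Int × Int)) (tags : List String) : Prop :=
  indexes.length ≤ tags.length
instance (text : String) (indexes : List (Int × Int)) (tags : List String) : Decidable (Pre_add_tags text indexes tags) := by unfold Pre_add_tags; infer_instance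

def pvWitness_add_tags : String × (List (Int × Int)) × List String := ("ab cd", [(0, 2), (3, 5)], ["x", "y"])

def Spec_add_tags (text : String) (indexes : List (Int × Int)) (tags : List String) (out : String) : Prop := out = add_tags_alt text indexes tags
instance (text : String) (indexes : List (Int × Int)) (tags : List String) (out : String) : Decidable (Spec_add_tags text indexes tags out) := by unfold Spec_add_tags; infer_instance

-- ===== CLAIM (what is proved, stated in full; the proofs are below) =====
def Claim_equal_add_tags : Prop := ∀ (text : String) (indexes : List (Int × Int)) (tags : List String), Dom_add_tags text indexes tags → Pre_add_tags text indexes tags → Spec_add_tags text indexes tags (add_tags text indexes tags)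

-- ===== LEMMAS AND PROOFS =====

-- the (position, tag) pairs both programs generate, in source order
def tagPair (tags : List String) (ip : Int × (Int × Int)) : List (Int × String) :=
  [(ip.2.1, "[" ++ PySem.List.pyGetD tags ip.1 "" ++ "]"),
   (ip.2.2, "[/" ++ PySem.List.pyGetD tags ip.1 "" ++ "]")]

-- the characters a piece table represents
def flatP (pieces : List String) : List Char := (pieces.map String.toList).flatten

theorem foldB_eq (tags : List String) (l : List (Int × (Int × Int))) (acc : List (Int × String)) :
    l.foldl (fun acc ip =>
        acc ++ [(ip.2.1, "[" ++ PySem.List.pyGetD tags ip.1 "" ++ "]")]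
            ++ [(ip.2.2, "[/" ++ PySem.List.pyGetD tags ip.1 "" ++ "]")]) acc
      = acc ++ l.flatMap (tagPair tags) := by
  induction l generalizing acc with
  | nil => simp
  | cons ip t ih =>
      rw [List.foldl_cons, ih, List.flatMap_cons]
      simp [tagPair]

theorem foldA_zip (tags : List String) (l : List (Int × (Int × Int)))
    (xs : List Int) (ys : List String) (hlen : xs.length = ys.length) :
    ((l.foldl (fun (acc : List Int × List String) ip =>
        (acc.1 ++ [ip.2.1] ++ [ip.2.2],
         acc.2 ++ ["[" ++ PySem.List.pyGetD tags ip.1 "" ++ "]"]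
               ++ ["[/" ++ PySem.List.pyGetD tags ip.1 "" ++ "]"])) (xs, ys)).1).zip
      ((l.foldl (fun (acc : List Int × List String) ip =>
        (acc.1 ++ [ip.2.1] ++ [ip.2.2],
         acc.2 ++ ["[" ++ PySem.List.pyGetD tags ip.1 "" ++ "]"]
               ++ ["[/" ++ PySem.List.pyGetD tags ip.1 "" ++ "]"])) (xs, ys)).2)
      = xs.zip ys ++ l.flatMap (tagPair tags) := by
  induction l generalizing xs ys with
  | nil => simp
  | cons ip t ih =>
      simp only [List.foldl_cons]
      rw [ih (xs ++ [ip.2.1] ++ [ip.2.2])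
            (ys ++ ["[" ++ PySem.List.pyGetD tags ip.1 "" ++ "]"]
                ++ ["[/" ++ PySem.List.pyGetD tags ip.1 "" ++ "]"])
            (by simp [hlen])]
      rw [List.append_assoc xs, List.append_assoc ys,
          List.zip_append (by omega), List.flatMap_cons]
      simp [tagPair]

theorem chars_join_nil (ls : List (List Char)) : PySem.Chars.join [] ls = ls.flatten := by
  unfold PySem.Chars.join List.intercalate
  induction ls with
  | nil => rfl
  | cons a t ih =>
      cases t with
      | nil => simp
      | cons b t' => simp_all [List.intersperse]

theorem slice_none_some (t : List Char) (i : Int) :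
    PySem.List.slice t none (some i) = t.take (PySem.List.clampIdx t.length i) := by
  simp [PySem.List.slice]

theorem insertAt_ne_nil (tag : String) (pos : Int) (pieces : List String) (acc : Int)
    (h : pieces ≠ []) : insertAt tag pos pieces acc ≠ [] := by
  cases pieces with
  | nil => simp at h
  | cons piece rest =>
      unfold insertAt
      split <;> simp

theorem insertAt_cons (tag : String) (pos : Int) (piece : String) (rest : List String) (acc : Int) :
    insertAt tag pos (piece :: rest) acc
      = if pos ≤ acc + PySem.Str.len piece then
          String.ofList (PySem.List.slice piece.toList none (some (pos - acc))) :: tag ::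
            String.ofList (PySem.List.slice piece.toList (some (pos - acc)) none) :: rest
        else piece :: insertAt tag pos rest (acc + PySem.Str.len piece) := rfl

theorem flat_insertAt (tag : String) (pos : Int) (pieces : List String) (acc : Int)
    (hne : pieces ≠ []) (h0 : acc ≤ pos) (h2 : pos - acc ≤ ((flatP pieces).length : Int)) :
    flatP (insertAt tag pos pieces acc)
      = (flatP pieces).take (pos - acc).toNat ++ tag.toList
          ++ (flatP pieces).drop (pos - acc).toNat := by
  induction pieces generalizing acc with
  | nil => simp at hne
  | cons piece rest ih =>
      have hflat : flatP (piece :: rest) = piece.toList ++ flatP rest := by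
        simp [flatP]
      by_cases hif : pos ≤ acc + PySem.Str.len piece
      · rw [insertAt_cons, if_pos hif,
            PySem.List.slice_to _ (by omega), PySem.List.slice_from _ (by omega)]
        have hlep : (pos - acc).toNat ≤ piece.toList.length := by
          rw [PySem.Str.len_eq] at hif
          omega
        rw [hflat, List.take_append_of_le_length hlep, List.drop_append_of_le_length hlep]
        simp [flatP]
      · rw [insertAt_cons, if_neg hif]
        rw [PySem.Str.len_eq] at hif
        push_neg at hif
        rw [hflat, List.length_append] at h2
        push_cast at h2
        have hrest2 : pos - (acc + (piece.toList.length : Int)) ≤ ((flatP rest).length : Int) := by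
          omega
        have hrne : rest ≠ [] := by
          intro hcon
          subst hcon
          have hz : (flatP ([] : List String)).length = 0 := rfl
          omega
        have hih := ih (acc + (piece.toList.length : Int)) hrne (by omega) hrest2
        rw [show acc + PySem.Str.len piece = acc + (piece.toList.length : Int) from by
              rw [PySem.Str.len_eq]]
        rw [show flatP (piece :: insertAt tag pos rest (acc + (piece.toList.length : Int)))
              = piece.toList ++ flatP (insertAt tag pos rest (acc + (piece.toList.length : Int))) from by
            simp [flatP]]
        rw [hih, hflat, List.take_append, List.drop_append]
        have ht : List.take (pos - acc).toNat piece.toList = piece.toList :=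
          List.take_of_length_le (by omega)
        have hd : List.drop (pos - acc).toNat piece.toList = [] :=
          List.drop_eq_nil_of_le (by omega)
        have harith : (pos - acc).toNat - piece.toList.length
            = (pos - (acc + (piece.toList.length : Int))).toNat := by omega
        rw [ht, hd, harith]
        simp [List.append_assoc]

theorem foldAB (evs : List (Int × String)) (t : List Char) (pieces : List String) (len : Int)
    (hflat : flatP pieces = t) (hlen : len = (t.length : Int)) (hne : pieces ≠ []) :
    flatP ((evs.foldl (fun (st : List String × Int) ev =>
        let pos0 : Int := if 0 ≤ ev.1 then ev.1 else st.2 + ev.1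
        let pos : Int := if pos0 < 0 then 0 else if st.2 < pos0 then st.2 else pos0
        (insertAt ev.2 pos st.1 0, st.2 + PySem.Str.len ev.2)) (pieces, len)).1)
      = evs.foldl (fun (t : List Char) it =>
          PySem.List.slice t none (some it.1) ++ it.2.toList
            ++ PySem.List.slice t (some it.1) none) t := by
  induction evs generalizing t pieces len with
  | nil => simpa using hflat
  | cons ev rest ih =>
      simp only [List.foldl_cons]
      set pos0 : Int := if 0 ≤ ev.1 then ev.1 else len + ev.1 with hpos0
      set pos : Int := if pos0 < 0 then 0 else if len < pos0 then len else pos0 with hpos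
      have hclamp : pos = (PySem.List.clampIdx t.length ev.1 : Int) := by
        rw [hpos, hpos0, hlen]
        unfold PySem.List.clampIdx
        split_ifs <;> omega
      have hposle : pos - 0 ≤ ((flatP pieces).length : Int) := by
        rw [hflat, hclamp]
        have := PySem.List.clampIdx_le t.length ev.1
        omega
      have hpos0le : (0 : Int) ≤ pos := by
        rw [hclamp]; omega
      have hins := flat_insertAt ev.2 pos pieces 0 hne (by omega) hposle
      apply ih
      · rw [hins, hflat, hclamp,
            slice_none_some t ev.1, PySem.List.slice_some_none t ev.1]
        simp
      · have hc := PySem.List.clampIdx_le t.length ev.1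
        rw [slice_none_some t ev.1, PySem.List.slice_some_none t ev.1, hlen, PySem.Str.len_eq]
        simp [List.length_append]
        omega
      · exact insertAt_ne_nil ev.2 pos pieces 0 hne

theorem add_tags_eq_alt (text : String) (indexes : List (Int × Int)) (tags : List String) :
    add_tags text indexes tags = add_tags_alt text indexes tags := by
  unfold add_tags add_tags_alt
  simp only []
  rw [foldA_zip tags (PySem.List.enumerate indexes 0) [] [] rfl,
      foldB_eq tags (PySem.List.enumerate indexes 0) []]
  simp only [List.zip_nil_left, List.nil_append]
  unfold PySem.Str.join
  refine congrArg String.ofList ?_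
  rw [show ("" : String).toList = ([] : List Char) from rfl, chars_join_nil]
  rw [← flatP]
  rw [foldAB _ text.toList [text] (PySem.Str.len text) (by simp [flatP])
        (by rw [PySem.Str.len_eq]) (by simp)]

-- ===== VERDICT (by name: the statement is the Claim_ definition above) =====
theorem add_tags_spec : Claim_equal_add_tags := by
  intro text indexes tags _ _
  unfold Spec_add_tags
  exact add_tags_eq_alt text indexes tags
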